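-- pv_equiv track=rewrite | github.com/leticiaarj/python_exercises | String/SortedString.py | oddOrEven
-- ===== SOURCE A (Python) =====
-- def oddOrEven(digit):
--     odd_digit = []
--     even_digit = []
--     digitToString = []
--
--     for dig in digit:
--         if(dig%2 == 0):
--             even_digit.append(dig)
--             even_digit.sort()
--         else:
--             odd_digit.append(dig)
--             odd_digit.sort()
--
--     sum = odd_digit + even_digit
--
--     for s in sum:
--         digitToString.append(str(s))
--
--     return digitToString
-- ===== SOURCE B (Python) =====
-- def oddOrEven(digit):
--     odd_part = []
--     even_part = []
--     for d in sorted(digit):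
--         if d % 2 != 0:
--             odd_part.append(str(d))
--         else:
--             even_part.append(str(d))
--     return odd_part + even_part
-- ===== Notes on version B (the rewrite author's own statement) =====
-- stated objective: faster
-- what changed: A partitions digits by parity while re-sorting each bucket after every append and stringifies in a second loop; B sorts the whole list once and makes a single partition pass that collects the string forms directly.
import Mathlib
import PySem

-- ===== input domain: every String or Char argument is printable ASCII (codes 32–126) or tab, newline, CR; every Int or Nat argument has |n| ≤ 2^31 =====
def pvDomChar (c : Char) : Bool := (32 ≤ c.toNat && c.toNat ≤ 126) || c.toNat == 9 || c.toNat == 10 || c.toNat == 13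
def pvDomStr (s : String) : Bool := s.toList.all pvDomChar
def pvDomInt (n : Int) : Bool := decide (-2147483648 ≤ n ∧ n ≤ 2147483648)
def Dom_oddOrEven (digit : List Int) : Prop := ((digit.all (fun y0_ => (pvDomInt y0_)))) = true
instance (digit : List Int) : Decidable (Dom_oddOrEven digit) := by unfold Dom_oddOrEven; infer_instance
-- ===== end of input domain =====

-- B sorts the whole list once and partitions in one pass; A re-sorts each parity bucket after every append and stringifies in a second loop (objective: simpler).

-- ===== PORT A =====
def oddOrEven (digit : List Int) : List String :=
  let st := digit.foldl (fun (st : List Int × List Int) dig =>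
    if PySem.Int.mod dig 2 == 0 then
      (st.1, PySem.List.sorted (st.2 ++ [dig]) (fun x => x) false)
    else
      (PySem.List.sorted (st.1 ++ [dig]) (fun x => x) false, st.2)) ([], [])
  let sum := st.1 ++ st.2
  sum.foldl (fun acc s => acc ++ [PySem.Int.toStr s]) []

-- ===== PORT B =====
def oddOrEven_alt (digit : List Int) : List String :=
  let st := (PySem.List.sorted digit (fun x => x) false).foldl
    (fun (st : List String × List String) d =>
      if PySem.Int.mod d 2 != 0 then (st.1 ++ [PySem.Int.toStr d], st.2)
      else (st.1, st.2 ++ [PySem.Int.toStr d])) ([], [])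
  st.1 ++ st.2

-- ===== PRECONDITION & SPEC =====
def Spec_oddOrEven (digit : List Int) (out : List String) : Prop := out = oddOrEven_alt digit
instance (digit : List Int) (out : List String) : Decidable (Spec_oddOrEven digit out) := by unfold Spec_oddOrEven; infer_instance

-- ===== CLAIM (what is proved, stated in full; the proofs are below) =====
def Claim_equal_oddOrEven : Prop := ∀ (digit : List Int), Dom_oddOrEven digit → Spec_oddOrEven digit (oddOrEven digit)

-- ===== LEMMAS AND PROOFS =====

def pvEven (d : Int) : Bool := PySem.Int.mod d 2 == 0

lemma sorted_append_one (l : List Int) (x : Int) :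
    PySem.List.sorted (PySem.List.sorted l (fun y => y) false ++ [x]) (fun y => y) false
      = PySem.List.sorted (l ++ [x]) (fun y => y) false := by
  exact PySem.List.sorted_eq_sorted_of_perm _ _ _ (fun a b h => h)
    ((PySem.List.sorted_perm l (fun y => y) false).append (List.Perm.refl [x]))

lemma foldA_inv (l o e : List Int) :
    l.foldl (fun (st : List Int × List Int) dig =>
      if PySem.Int.mod dig 2 == 0 then
        (st.1, PySem.List.sorted (st.2 ++ [dig]) (fun x => x) false)
      else
        (PySem.List.sorted (st.1 ++ [dig]) (fun x => x) false, st.2))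
      (PySem.List.sorted o (fun x => x) false, PySem.List.sorted e (fun x => x) false)
    = (PySem.List.sorted (o ++ l.filter (fun d => !pvEven d)) (fun x => x) false,
       PySem.List.sorted (e ++ l.filter pvEven) (fun x => x) false) := by
  induction l generalizing o e with
  | nil => simp
  | cons x t ih =>
    by_cases hx : pvEven x = true
    · have hc : (PySem.Int.mod x 2 == 0) = true := hx
      simp only [List.foldl_cons, hc, if_true, sorted_append_one]
      rw [ih o (e ++ [x])]
      simp [hx, List.append_assoc]
    · have hc : (PySem.Int.mod x 2 == 0) = false := by
        simpa [pvEven] using hx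
      simp only [List.foldl_cons, hc, Bool.false_eq_true, if_false, sorted_append_one]
      rw [ih (o ++ [x]) e]
      simp [hx, List.append_assoc]

lemma foldB_inv (l : List Int) (os es : List String) :
    l.foldl (fun (st : List String × List String) d =>
      if PySem.Int.mod d 2 != 0 then (st.1 ++ [PySem.Int.toStr d], st.2)
      else (st.1, st.2 ++ [PySem.Int.toStr d])) (os, es)
    = (os ++ (l.filter (fun d => !pvEven d)).map PySem.Int.toStr,
       es ++ (l.filter pvEven).map PySem.Int.toStr) := by
  induction l generalizing os es with
  | nil => simp
  | cons x t ih =>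
    by_cases hx : pvEven x = true
    · have hc : (PySem.Int.mod x 2 != 0) = false := by
        simpa [pvEven, bne] using hx
      simp only [List.foldl_cons, hc, Bool.false_eq_true, if_false]
      rw [ih]
      simp [hx, List.append_assoc]
    · have hc : (PySem.Int.mod x 2 != 0) = true := by
        simpa [pvEven, bne] using hx
      simp only [List.foldl_cons, hc, if_true]
      rw [ih]
      simp [hx, List.append_assoc]

lemma foldl_toStr (l : List Int) (acc : List String) :
    l.foldl (fun acc s => acc ++ [PySem.Int.toStr s]) acc = acc ++ l.map PySem.Int.toStr := by
  induction l generalizing acc with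
  | nil => simp
  | cons x t ih => simp [List.foldl_cons, ih, List.append_assoc]

lemma filter_sorted (digit : List Int) (p : Int → Bool) :
    PySem.List.sorted (digit.filter p) (fun x => x) false
      = (PySem.List.sorted digit (fun x => x) false).filter p := by
  apply PySem.List.sorted_id_eq_of_perm_of_pairwise
  · exact (PySem.List.sorted_perm digit (fun x => x) false).filter p
  · exact List.Pairwise.filter p (PySem.List.sorted_pairwise digit (fun x => x))

-- ===== VERDICT (by name: the statement is the Claim_ definition above) =====
theorem oddOrEven_spec : Claim_equal_oddOrEven := by
  intro digit _
  show oddOrEven digit = oddOrEven_alt digit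
  unfold oddOrEven oddOrEven_alt
  have hA := foldA_inv digit [] []
  simp only [show PySem.List.sorted ([] : List Int) (fun x => x) false = [] from rfl] at hA
  rw [hA, foldB_inv, foldl_toStr]
  simp only [List.nil_append]
  rw [filter_sorted, filter_sorted]
  simp [List.map_append]
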